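-- pv_equiv track=rewrite | github.com/MrBrantCode/unitest_baseline | mut_generate/mist_train_taco/taco_8206/solution.py | count_ways_to_cut_stripe
-- ===== SOURCE A (Python) =====
-- def count_ways_to_cut_stripe(n, lis):
--     # Calculate prefix sums
--     pre = [0] * (n + 1)
--     for i in range(1, n + 1):
--         pre[i] = pre[i - 1] + lis[i - 1]
--
--     # Check if the total sum is divisible by 3
--     if pre[-1] % 3 != 0:
--         return 0
--
--     s = pre[-1] // 3
--     ans = 0
--     t = 0
--
--     # Iterate through the prefix sums to count valid cuts
--     for i in range(1, n):
--         if pre[i] == 2 * s: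
--             ans += t
--         if pre[i] == s:
--             t += 1
--
--     return ans
-- ===== SOURCE B (Python) =====
-- def count_ways_to_cut_stripe(n, lis):
--     # Prefix sums of the first n elements.
--     pre = [0]
--     for i in range(n):
--         pre.append(pre[-1] + lis[i])
--     total = pre[-1]
--     if total % 3 != 0:
--         return 0
--     s = total // 3
--     inner = pre[1:n]  # pre[1], ..., pre[n-1]
--     # Suffix table: suf[i] = number of strictly-later positions j in inner with pre[j] == 2*s.
--     suf = []
--     run = 0
--     for p in reversed(inner):
--         suf.append(run)
--         if p == 2 * s:
--             run += 1
--     suf.reverse()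
--     # Forward pass: every s-position contributes its stored suffix count.
--     return sum(c for p, c in zip(inner, suf) if p == s)
-- ===== Notes on version B (the rewrite author's own statement) =====
-- stated objective: alternative
-- what changed: Replaces A's single forward pass with an incremental counter by a two-phase scheme: a backward pass precomputes a suffix-count table of strictly-later 2s-positions, then a forward pass sums the table entries at the s-positions.
import Mathlib
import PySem

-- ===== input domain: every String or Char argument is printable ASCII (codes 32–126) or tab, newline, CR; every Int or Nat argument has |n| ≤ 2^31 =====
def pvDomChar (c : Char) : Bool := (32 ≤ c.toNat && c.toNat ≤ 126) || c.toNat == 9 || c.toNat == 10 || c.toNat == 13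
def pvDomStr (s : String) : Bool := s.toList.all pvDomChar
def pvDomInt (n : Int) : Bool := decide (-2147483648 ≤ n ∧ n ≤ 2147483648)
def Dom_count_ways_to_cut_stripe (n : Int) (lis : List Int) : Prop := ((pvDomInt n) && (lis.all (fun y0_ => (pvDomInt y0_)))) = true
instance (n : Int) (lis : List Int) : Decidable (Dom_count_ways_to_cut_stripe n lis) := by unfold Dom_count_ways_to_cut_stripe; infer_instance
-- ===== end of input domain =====

-- B replaces A's one-pass incremental counter by a precomputed suffix-count table plus a
-- forward summing pass (alternative decomposition, same asymptotic cost).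

-- ===== PORT A =====
def count_ways_to_cut_stripe (n : Int) (lis : List Int) : Int :=
  -- pre = [0]*(n+1); for i in range(1, n+1): pre[i] = pre[i-1] + lis[i-1]
  -- (ported as growing the written prefix of pre: pre[i-1] is the last written cell)
  let pre := (PySem.List.pyRange 1 (n + 1) 1).foldl
    (fun pre i => pre ++ [pre.getLastD 0 + PySem.List.pyGetD lis (i - 1) 0]) [0]
  let total := pre.getLastD 0          -- pre[-1] (pre is nonempty)
  if PySem.Int.mod total 3 ≠ 0 then 0
  else
    let s := PySem.Int.floordiv total 3
    -- ans = 0; t = 0; for i in range(1, n): …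
    ((PySem.List.pyRange 1 n 1).foldl
      (fun (st : Int × Int) i =>
        (if PySem.List.pyGetD pre i 0 = 2 * s then st.1 + st.2 else st.1,
         if PySem.List.pyGetD pre i 0 = s then st.2 + 1 else st.2))
      (0, 0)).1

-- ===== PORT B =====
def count_ways_to_cut_stripe_alt (n : Int) (lis : List Int) : Int :=
  -- pre = [0]; for i in range(n): pre.append(pre[-1] + lis[i])
  let pre := (PySem.List.pyRange 0 n 1).foldl
    (fun pre i => pre ++ [pre.getLastD 0 + PySem.List.pyGetD lis i 0]) [0]
  let total := pre.getLastD 0          -- pre[-1] (pre is nonempty)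
  if PySem.Int.mod total 3 ≠ 0 then 0
  else
    let s := PySem.Int.floordiv total 3
    let inner := PySem.List.slice pre (some 1) (some n)   -- pre[1:n]
    -- suf = []; run = 0; for p in reversed(inner): suf.append(run); if p == 2*s: run += 1
    let sr := inner.reverse.foldl
      (fun (st : List Int × Int) p =>
        (st.1 ++ [st.2], if p = 2 * s then st.2 + 1 else st.2)) ([], 0)
    let suf := sr.1.reverse                               -- suf.reverse()
    -- sum(c for p, c in zip(inner, suf) if p == s)
    ((inner.zip suf).foldl (fun acc pc => if pc.1 = s then acc + pc.2 else acc) 0)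

-- ===== PRECONDITION & SPEC =====
-- Pre_ excludes exactly the inputs where A raises IndexError: n < 0 (pre = [] so pre[-1]
-- fails) or n > len(lis) (the prefix loop reads lis out of range).
def Pre_count_ways_to_cut_stripe (n : Int) (lis : List Int) : Prop :=
  0 ≤ n ∧ n ≤ (lis.length : Int)
instance (n : Int) (lis : List Int) : Decidable (Pre_count_ways_to_cut_stripe n lis) := by
  unfold Pre_count_ways_to_cut_stripe; infer_instance

def pvWitness_count_ways_to_cut_stripe : Int × List Int := (3, [1, 1, 1])

def Spec_count_ways_to_cut_stripe (n : Int) (lis : List Int) (out : Int) : Prop := out = count_ways_to_cut_stripe_alt n lis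
instance (n : Int) (lis : List Int) (out : Int) : Decidable (Spec_count_ways_to_cut_stripe n lis out) := by unfold Spec_count_ways_to_cut_stripe; infer_instance

-- ===== CLAIM (what is proved, stated in full; the proofs are below) =====
def Claim_equal_count_ways_to_cut_stripe : Prop := ∀ (n : Int) (lis : List Int), Dom_count_ways_to_cut_stripe n lis → Pre_count_ways_to_cut_stripe n lis → Spec_count_ways_to_cut_stripe n lis (count_ways_to_cut_stripe n lis)


-- ===== LEMMAS AND PROOFS =====

-- c2 s ps : how many entries of ps equal 2*s (as an Int)
def c2 (s : Int) (ps : List Int) : Int := (ps.countP (fun p => decide (p = 2 * s)) : Int)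

-- G s ps : number of pairs i < j in ps with ps[i] = s and ps[j] = 2*s
def G (s : Int) : List Int → Int
  | [] => 0
  | p :: ps => (if p = s then c2 s ps else 0) + G s ps

-- the common prefix-sum list
def stepB (pre : List Int) (x : Int) : List Int := pre ++ [pre.getLastD 0 + x]

lemma c2_cons (s p : Int) (ps : List Int) :
    c2 s (p :: ps) = (if p = 2 * s then 1 else 0) + c2 s ps := by
  by_cases h : p = 2 * s <;> simp [c2, h]; omega

-- A's prefix loop over indices equals B's prefix loop over the taken elements
lemma pre_eq (m : Nat) (lis : List Int) (hm : m ≤ lis.length) :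
    (PySem.List.pyRange 1 ((m : Int) + 1) 1).foldl
      (fun pre i => pre ++ [pre.getLastD 0 + PySem.List.pyGetD lis (i - 1) 0]) [0]
    = (lis.take m).foldl (fun pre x => pre ++ [pre.getLastD 0 + x]) [0] := by
  induction m with
  | zero => simp [PySem.List.pyRange_one_eq_nil]
  | succ k ih =>
    have h1 : ((k : Int) + 1 + 1) = ((k : Int) + 1) + 1 := by ring
    have h2 : PySem.List.pyRange 1 ((k : Int) + 1 + 1) 1
        = PySem.List.pyRange 1 ((k : Int) + 1) 1 ++ [(k : Int) + 1] := by
      rw [h1, PySem.List.pyRange_one_succ_right (by omega)]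
    have hk : k < lis.length := by omega
    have h3 : lis.take (k + 1) = lis.take k ++ [lis[k]] := by
      rw [List.take_succ]; simp [List.getElem?_eq_getElem hk]
    push_cast
    rw [h2, List.foldl_append, h3, List.foldl_append, ih (by omega)]
    have h4 : ((k : Int) + 1 - 1) = ((k : Nat) : Int) := by ring
    simp [h4, PySem.List.pyGetD_natCast, List.getElem?_eq_getElem hk]

-- B's prefix loop over indices 0..n-1 equals the same element-level loop
lemma pre_eqB (m : Nat) (lis : List Int) (hm : m ≤ lis.length) :
    (PySem.List.pyRange 0 (m : Int) 1).foldl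
      (fun pre i => pre ++ [pre.getLastD 0 + PySem.List.pyGetD lis i 0]) [0]
    = (lis.take m).foldl (fun pre x => pre ++ [pre.getLastD 0 + x]) [0] := by
  induction m with
  | zero => simp [PySem.List.pyRange_one_eq_nil]
  | succ k ih =>
    have h2 : PySem.List.pyRange 0 ((k : Int) + 1) 1
        = PySem.List.pyRange 0 (k : Int) 1 ++ [(k : Int)] := by
      rw [PySem.List.pyRange_one_succ_right (by omega)]
    have hk : k < lis.length := by omega
    have h3 : lis.take (k + 1) = lis.take k ++ [lis[k]] := by
      rw [List.take_succ]; simp [List.getElem?_eq_getElem hk]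
    push_cast
    rw [h2, List.foldl_append, h3, List.foldl_append, ih (by omega)]
    simp [PySem.List.pyGetD_natCast, List.getElem?_eq_getElem hk]

-- length of the prefix-sum accumulator
lemma len_foldl_stepB : ∀ (l a : List Int),
    (l.foldl (fun pre x => pre ++ [pre.getLastD 0 + x]) a).length = a.length + l.length := by
  intro l
  induction l with
  | nil => simp
  | cons x xs ih => intro a; rw [List.foldl_cons, ih]; simp; omega

-- A's counting loop over indices 1..m-1 equals the element-level loop over pre[1:m]
lemma loopA_indexed (s : Int) (pre : List Int) :
    ∀ (m : Nat), m ≤ pre.length → ∀ (st : Int × Int),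
    (PySem.List.pyRange 1 (m : Int) 1).foldl
      (fun (st : Int × Int) i =>
        (if PySem.List.pyGetD pre i 0 = 2 * s then st.1 + st.2 else st.1,
         if PySem.List.pyGetD pre i 0 = s then st.2 + 1 else st.2)) st
    = ((pre.drop 1).take (m - 1)).foldl
      (fun (st : Int × Int) p =>
        (if p = 2 * s then st.1 + st.2 else st.1,
         if p = s then st.2 + 1 else st.2)) st := by
  intro m
  induction m with
  | zero => intro _ st; simp [PySem.List.pyRange_one_eq_nil]
  | succ k ih =>
    intro hk st
    match k, ih with
    | 0, _ => simp [PySem.List.pyRange_one_eq_nil]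
    | j + 1, ih =>
      have h2 : PySem.List.pyRange 1 ((j : Int) + 1 + 1) 1
          = PySem.List.pyRange 1 ((j : Int) + 1) 1 ++ [(j : Int) + 1] := by
        rw [PySem.List.pyRange_one_succ_right (by omega)]
      have hjd : j < (pre.drop 1).length := by simp; omega
      have h3 : (pre.drop 1).take (j + 1) = (pre.drop 1).take j ++ [(pre.drop 1)[j]] := by
        rw [List.take_succ]; simp [List.getElem?_eq_getElem hjd]
      have hj1 : j + 1 < pre.length := by omega
      have hval : PySem.List.pyGetD pre ((j : Int) + 1) 0 = (pre.drop 1)[j] := by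
        have : ((j : Int) + 1) = ((j + 1 : Nat) : Int) := by push_cast; ring
        rw [this, PySem.List.pyGetD_natCast, List.getD_eq_getElem _ _ hj1]
        simp
      push_cast
      rw [h2, List.foldl_append]
      have := ih (by omega) st
      push_cast at this
      rw [this]
      simp only [h3, List.foldl_append, List.foldl_cons, List.foldl_nil, hval]

-- A's element-level counting loop computes G (plus the carried state)
lemma loopA_G (s : Int) : ∀ (ps : List Int) (ans t : Int),
    ((ps.foldl (fun (st : Int × Int) p =>
        (if p = 2 * s then st.1 + st.2 else st.1,
         if p = s then st.2 + 1 else st.2)) (ans, t)).1)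
    = ans + t * c2 s ps + G s ps := by
  intro ps
  induction ps with
  | nil => intro ans t; simp [c2, G]
  | cons p ps ih =>
    intro ans t
    simp only [List.foldl_cons, ih, c2_cons, G]
    split_ifs <;> ring

-- the suffix table B builds, characterised structurally
def sufT (s : Int) : List Int → List Int
  | [] => []
  | _ :: ps => c2 s ps :: sufT s ps

-- B's backward pass builds (reverse of) the suffix table, and its running counter is c2
lemma suf_build (s : Int) : ∀ (ps : List Int),
    ps.reverse.foldl
      (fun (st : List Int × Int) p =>
        (st.1 ++ [st.2], if p = 2 * s then st.2 + 1 else st.2)) ([], 0)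
    = ((sufT s ps).reverse, c2 s ps) := by
  intro ps
  induction ps with
  | nil => simp [sufT, c2]
  | cons p ps ih =>
    simp only [List.reverse_cons, List.foldl_append, ih, List.foldl_cons, List.foldl_nil,
      sufT, c2_cons]
    simp only [Prod.mk.injEq, true_and]
    split_ifs <;> omega

-- B's forward zip-sum over the suffix table computes G
lemma zip_sum_G (s : Int) : ∀ (ps : List Int) (acc : Int),
    ((ps.zip (sufT s ps)).foldl
      (fun acc (pc : Int × Int) => if pc.1 = s then acc + pc.2 else acc) acc)
    = acc + G s ps := by
  intro ps
  induction ps with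
  | nil => intro acc; simp [sufT, G]
  | cons p ps ih =>
    intro acc
    simp only [sufT, List.zip_cons_cons, List.foldl_cons, ih, G]
    split_ifs <;> ring

-- ===== VERDICT (by name: the statement is the Claim_ definition above) =====
theorem count_ways_to_cut_stripe_spec : Claim_equal_count_ways_to_cut_stripe := by
  intro n lis _ hpre
  obtain ⟨h0, hlen⟩ := hpre
  lift n to ℕ using h0 with m
  have hm : m ≤ lis.length := by exact_mod_cast hlen
  unfold Spec_count_ways_to_cut_stripe count_ways_to_cut_stripe count_ways_to_cut_stripe_alt
  rw [pre_eq m lis hm, pre_eqB m lis hm]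
  set P := (lis.take m).foldl (fun pre x => pre ++ [pre.getLastD 0 + x]) [0] with hP
  have hPlen : P.length = m + 1 := by
    rw [hP, len_foldl_stepB, List.length_take]; simp; omega
  by_cases hmod : PySem.Int.mod (P.getLastD 0) 3 ≠ 0
  · rw [if_pos hmod, if_pos hmod]
  · rw [if_neg hmod, if_neg hmod]
    set s := PySem.Int.floordiv (P.getLastD 0) 3 with hs
    have hinner : PySem.List.slice P (some 1) (some (m : Int)) = (P.drop 1).take (m - 1) := by
      rw [PySem.List.slice_toNat _ (by omega) (by omega)]
      norm_num
    simp only [hinner]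
    rw [loopA_indexed s P m (by omega) (0, 0), loopA_G, suf_build]
    simp only [List.reverse_reverse]
    rw [zip_sum_G]
    ring
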